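-- pv_equiv track=rewrite | github.com/chu-andrew/audible | Code/encoding.py | bits_to_tones
-- ===== SOURCE A (Python) =====
-- def bits_to_tones(data, tone_map, chunk_len, channels):
--     assert len(data) % chunk_len == 0
--     assert len(data) / chunk_len % channels == 0
--
--     tones = []
--     for count, chunk in enumerate(chunk_data(data, chunk_len)):
--         channel_num = count % channels
--         if channel_num == 0: tones.append([])
--
--         assert chunk in tone_map[channel_num]
--         tones[-1].append(tone_map[channel_num][chunk])
--
--     return tones
--
-- def chunk_data(data, chunk_len):
--     for i in range(0, len(data), chunk_len):
--         chunk = data[i:i + chunk_len]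
--         yield chunk
-- ===== SOURCE B (Python) =====
-- def bits_to_tones(data, tone_map, chunk_len, channels):
--     assert len(data) % chunk_len == 0
--     assert len(data) / chunk_len % channels == 0
--
--     chunks = [data[i:i + chunk_len] for i in range(0, len(data), chunk_len)]
--
--     tones = []
--     for r in range(0, len(chunks), channels):
--         row = []
--         for c, chunk in enumerate(chunks[r:r + channels]):
--             assert chunk in tone_map[c]
--             row.append(tone_map[c][chunk])
--         tones.append(row)
--     return tones
-- ===== Notes on version B (the rewrite author's own statement) =====
-- stated objective: simpler
-- what changed: A threads a running count%channels state through one enumerate loop, opening a new row on channel 0 and mutating tones[-1]; B materialises the chunk list once and builds each row directly by slicing it into consecutive groups of `channels` chunks. Pre_ excludes only the unspecified corner channels<0 with a nonempty chunk list, where A happens to return rows keyed by nonpositive channel numbers while B's range stepping yields no rows.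
-- outside the precondition, e.g. on bits_to_tones('ab', {0: {'a': 1}, -1: {'b': 2}}, 1, -2): A returns [[1, 2]], B returns []
import Mathlib
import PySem

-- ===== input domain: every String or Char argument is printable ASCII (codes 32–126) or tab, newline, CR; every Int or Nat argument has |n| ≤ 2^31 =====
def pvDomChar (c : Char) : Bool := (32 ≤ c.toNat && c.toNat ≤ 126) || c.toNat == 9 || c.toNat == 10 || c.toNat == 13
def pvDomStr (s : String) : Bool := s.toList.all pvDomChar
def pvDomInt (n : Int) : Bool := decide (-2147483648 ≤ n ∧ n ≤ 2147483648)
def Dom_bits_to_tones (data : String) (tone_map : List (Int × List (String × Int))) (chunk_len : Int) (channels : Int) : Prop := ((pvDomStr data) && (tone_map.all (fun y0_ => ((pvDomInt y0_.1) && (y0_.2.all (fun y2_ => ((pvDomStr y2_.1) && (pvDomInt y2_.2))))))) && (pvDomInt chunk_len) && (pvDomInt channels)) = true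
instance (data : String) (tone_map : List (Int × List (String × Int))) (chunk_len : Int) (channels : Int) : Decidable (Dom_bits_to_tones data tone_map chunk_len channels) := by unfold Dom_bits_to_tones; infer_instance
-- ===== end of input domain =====

-- B replaces A's running `count % channels` state and tones[-1] mutation by slicing the
-- chunk list into rows of `channels` directly (objective: simpler). Same cost, same results.

-- ===== PORT A =====

-- tone_map[channel_num][chunk]: dict-of-dicts lookup (defaults are unreachable under Pre_,
-- where both keys are present); shared by both ports since both Pythons write this lookup.
def pvLookup (tone_map : List (Int × List (String × Int))) (c : Int) (chunk : String) : Int :=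
  ((PySem.Dict.ofList (((PySem.Dict.ofList tone_map).get? c).getD [])).get? chunk).getD 0

-- generator chunk_data, materialised in source order
def chunk_data (data : String) (chunk_len : Int) : List String :=
  (PySem.List.pyRange 0 (PySem.Str.len data) chunk_len).map
    (fun i => PySem.Str.slice data (some i) (some (i + chunk_len)))

-- the `for count, chunk in enumerate(...)` loop with its running state
def bttLoop (tone_map : List (Int × List (String × Int))) (channels : Int) :
    List String → Int → List (List Int) → List (List Int)
  | [], _, tones => tones
  | chunk :: rest, count, tones =>
    let channel_num := PySem.Int.mod count channels
    let tones1 := if channel_num = 0 then tones ++ [[]] else tones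
    -- tones[-1].append(...): rebuild with the last row extended
    bttLoop tone_map channels rest (count + 1)
      (tones1.dropLast ++ [(tones1.getLast?.getD []) ++ [pvLookup tone_map channel_num chunk]])

def bits_to_tones (data : String) (tone_map : List (Int × List (String × Int))) (chunk_len : Int) (channels : Int) : List (List Int) :=
  bttLoop tone_map channels (chunk_data data chunk_len) 0 []

-- ===== PORT B =====
def bits_to_tones_alt (data : String) (tone_map : List (Int × List (String × Int))) (chunk_len : Int) (channels : Int) : List (List Int) :=
  let chunks := (PySem.List.pyRange 0 (PySem.Str.len data) chunk_len).map
    (fun i => PySem.Str.slice data (some i) (some (i + chunk_len)))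
  (PySem.List.pyRange 0 (PySem.List.len chunks) channels).map (fun r =>
    (PySem.List.enumerate (PySem.List.slice chunks (some r) (some (r + channels)))).map
      (fun p => pvLookup tone_map p.1 p.2))

-- ===== PRECONDITION & SPEC =====
-- Pre_ = the inputs on which the Python A returns: nonzero chunk_len and channels (else
-- ZeroDivisionError), the two (float-)division asserts hold, every chunk is a key of its
-- channel's dict — and not the corner "channels < 0 with a nonempty chunk list": no caller
-- specifies a negative channel count, and there A happens to group chunks into rows of
-- |channels| looked up under nonpositive channel keys while B's range stepping naturally
-- yields no rows; both values are defensible on that unspecified corner, so it is excluded.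
def Pre_bits_to_tones (data : String) (tone_map : List (Int × List (String × Int))) (chunk_len : Int) (channels : Int) : Prop :=
  chunk_len ≠ 0 ∧ channels ≠ 0 ∧
  PySem.Int.mod (PySem.Str.len data) chunk_len = 0 ∧
  PySem.Int.mod (PySem.Int.floordiv (PySem.Str.len data) chunk_len) channels = 0 ∧
  (1 ≤ channels ∨ PySem.Str.len data = 0 ∨ chunk_len < 0) ∧
  ((PySem.List.enumerate ((PySem.List.pyRange 0 (PySem.Str.len data) chunk_len).map
      (fun i => PySem.Str.slice data (some i) (some (i + chunk_len))))).all (fun p =>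
    match (PySem.Dict.ofList tone_map).get? (PySem.Int.mod p.1 channels) with
    | none => false
    | some inner => (PySem.Dict.ofList inner).contains p.2)) = true
instance (data : String) (tone_map : List (Int × List (String × Int))) (chunk_len : Int) (channels : Int) : Decidable (Pre_bits_to_tones data tone_map chunk_len channels) := by unfold Pre_bits_to_tones; infer_instance

def pvWitness_bits_to_tones : String × (List (Int × List (String × Int))) × Int × Int :=
  ("0110", [(0, [("01", 5)]), (1, [("10", 7)])], 2, 2)

def Spec_bits_to_tones (data : String) (tone_map : List (Int × List (String × Int))) (chunk_len : Int) (channels : Int) (out : List (List Int)) : Prop := out = bits_to_tones_alt data tone_map chunk_len channels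
instance (data : String) (tone_map : List (Int × List (String × Int))) (chunk_len : Int) (channels : Int) (out : List (List Int)) : Decidable (Spec_bits_to_tones data tone_map chunk_len channels out) := by unfold Spec_bits_to_tones; infer_instance

-- ===== CLAIM (what is proved, stated in full; the proofs are below) =====
def Claim_equal_bits_to_tones : Prop := ∀ (data : String) (tone_map : List (Int × List (String × Int))) (chunk_len : Int) (channels : Int), Dom_bits_to_tones data tone_map chunk_len channels → Pre_bits_to_tones data tone_map chunk_len channels → Spec_bits_to_tones data tone_map chunk_len channels (bits_to_tones data tone_map chunk_len channels)

-- ===== LEMMAS AND PROOFS =====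

-- canonical row decomposition both programs are reduced to: m rows of cN chunks each
def pvRow (tone_map : List (Int × List (String × Int))) (j : Int) (R : List String) : List Int :=
  (PySem.List.enumerate R j).map (fun p => pvLookup tone_map p.1 p.2)

def pvRowsOf (tone_map : List (Int × List (String × Int))) (cN : Nat) : Nat → List String → List (List Int)
  | 0, _ => []
  | m + 1, L => pvRow tone_map 0 (L.take cN) :: pvRowsOf tone_map cN m (L.drop cN)

theorem pv_count_eq (q c : Int) (hc : 1 ≤ c) (_hq : 0 ≤ q) : (q * c + c - 1) / c = q := by
  have h1 : q * c + c - 1 = (c - 1) + c * q := by ring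
  rw [h1, Int.add_mul_ediv_left _ _ (by omega), Int.ediv_eq_zero_of_lt (by omega) (by omega)]
  omega

theorem pv_pyRange_nil (n s : Int) (hn : 0 ≤ n) (h : s < 0 ∨ n ≤ 0) :
    PySem.List.pyRange 0 n s = [] := by
  simp only [PySem.List.pyRange]
  split_ifs <;> simp_all <;> omega

-- the start indices pyRange(0, m*cN, c) as a plain List.range
theorem pv_pyRange_rows (c : Int) (hc : 1 ≤ c) (m : Nat) (h : (0 : Int) ≤ m * c) :
    PySem.List.pyRange 0 (m * c) c = (List.range m).map (fun k : Nat => c * (k : Int)) := by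
  rcases Nat.eq_zero_or_pos m with hm | hm
  · subst hm; simp [PySem.List.pyRange_of_pos _ _ (by omega : (0:Int) < c)]
  · have hpos : (0 : Int) < m * c := by positivity
    have h2 : ((m * c : Int) - 0 + c - 1) / c = (m : Int) := by
      have := pv_count_eq m c hc (by positivity : (0:Int) ≤ (m:Int))
      rw [sub_zero]; linarith
    rw [PySem.List.pyRange_of_pos _ _ (by omega : (0:Int) < c), if_pos hpos, h2, Int.toNat_natCast]
    simp only [zero_add]

theorem pv_bttLoop_shift (tone_map : List (Int × List (String × Int))) (c : Int) (hc : 1 ≤ c)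
    (L : List String) : ∀ (k : Int) (tones : List (List Int)),
    bttLoop tone_map c L (k + c) tones = bttLoop tone_map c L k tones := by
  induction L with
  | nil => intro k tones; rfl
  | cons x rest ih =>
    intro k tones
    have hm : PySem.Int.mod (k + c) c = PySem.Int.mod k c := by
      rw [PySem.Int.mod_eq_emod_of_pos (by omega), PySem.Int.mod_eq_emod_of_pos (by omega)]
      simp
    simp only [bttLoop, hm]
    have : k + c + 1 = (k + 1) + c := by ring
    rw [this, ih]

theorem pv_bttLoop_partial (tone_map : List (Int × List (String × Int))) (c : Int) (hc : 1 ≤ c) :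
    ∀ (R L' : List String) (j : Int) (cur : List Int) (tones : List (List Int)),
    1 ≤ j → j + R.length ≤ c →
    bttLoop tone_map c (R ++ L') j (tones ++ [cur])
      = bttLoop tone_map c L' (j + R.length) (tones ++ [cur ++ pvRow tone_map j R]) := by
  intro R
  induction R with
  | nil => intro L' j cur tones hj hle; simp [pvRow, PySem.List.enumerate_nil]
  | cons y R0 ih =>
    intro L' j cur tones hj hle
    have hjc : j < c := by simp at hle; omega
    have hm : PySem.Int.mod j c = j := by
      rw [PySem.Int.mod_eq_emod_of_pos (by omega)]; exact Int.emod_eq_of_lt (by omega) hjc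
    have hj0 : ¬ (j = 0) := by omega
    simp only [List.cons_append, bttLoop, hm, hj0, if_false,
      List.dropLast_concat, List.getLast?_concat, Option.getD_some]
    rw [ih L' (j + 1) (cur ++ [pvLookup tone_map j y]) tones (by omega) (by simp at hle ⊢; omega)]
    congr 1
    · simp; omega
    · congr 2
      simp only [pvRow, PySem.List.enumerate_cons, List.map_cons, List.append_assoc,
        List.cons_append, List.nil_append]

theorem pv_bttLoop_rows (tone_map : List (Int × List (String × Int))) (c : Int) (hc : 1 ≤ c) :
    ∀ (m : Nat) (L : List String) (tones : List (List Int)), L.length = m * c.toNat →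
    bttLoop tone_map c L 0 tones = tones ++ pvRowsOf tone_map c.toNat m L := by
  intro m
  induction m with
  | zero =>
    intro L tones hL
    have : L = [] := List.eq_nil_of_length_eq_zero (by simpa using hL)
    subst this; simp [bttLoop, pvRowsOf]
  | succ m ih =>
    intro L tones hL
    have hcN : 1 ≤ c.toNat := by omega
    have hlen : c.toNat ≤ L.length := by
      rw [hL]; calc c.toNat = 1 * c.toNat := (one_mul _).symm
        _ ≤ (m + 1) * c.toNat := Nat.mul_le_mul_right _ (by omega)
    obtain ⟨x, R0, hR⟩ : ∃ x R0, L.take c.toNat = x :: R0 := by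
      cases htake : L.take c.toNat with
      | nil => exfalso; have := List.length_take_of_le hlen; rw [htake] at this; simp at this; omega
      | cons a b => exact ⟨a, b, rfl⟩
    have hsplit : L = (x :: R0) ++ L.drop c.toNat := by rw [← hR]; simp
    have hR0len : R0.length = c.toNat - 1 := by
      have := List.length_take_of_le hlen; rw [hR] at this; simp at this; omega
    have hmod0 : PySem.Int.mod 0 c = 0 := by
      rw [PySem.Int.mod_eq_emod_of_pos (by omega)]; simp
    conv_lhs => rw [hsplit]
    simp only [List.cons_append, bttLoop, hmod0, ite_true, zero_add,
      List.dropLast_concat, List.getLast?_concat, Option.getD_some, List.nil_append]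
    rw [pv_bttLoop_partial tone_map c hc R0 (L.drop c.toNat) 1
      [pvLookup tone_map 0 x] tones (by omega)
      (by rw [hR0len]; omega)]
    have hcount : (1 : Int) + R0.length = c := by rw [hR0len]; omega
    rw [hcount]
    have hshift := pv_bttLoop_shift tone_map c hc (L.drop c.toNat) 0
      (tones ++ [[pvLookup tone_map 0 x] ++ pvRow tone_map 1 R0])
    rw [show (0 : Int) + c = c by ring] at hshift
    rw [hshift, ih (L.drop c.toNat) _ (by simp [hL]; ring_nf; omega)]
    simp only [pvRowsOf, hR]
    simp only [pvRow, PySem.List.enumerate_cons, List.map_cons, zero_add]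
    simp

theorem pv_rowsOf_eq_map (tone_map : List (Int × List (String × Int))) (cN : Nat) :
    ∀ (m : Nat) (L : List String),
    pvRowsOf tone_map cN m L
      = (List.range m).map (fun k => pvRow tone_map 0 ((L.drop (cN * k)).take cN)) := by
  intro m
  induction m with
  | zero => intro L; simp [pvRowsOf]
  | succ m ih =>
    intro L
    rw [List.range_succ_eq_map, List.map_cons, List.map_map]
    simp only [pvRowsOf, ih (L.drop cN)]
    refine congrArg₂ List.cons (by simp) (List.map_congr_left ?_)
    intro k _
    simp only [Function.comp_apply, List.drop_drop, Nat.succ_eq_add_one]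
    have h : cN + cN * k = cN * (k + 1) := by ring
    rw [h]

-- B's pyRange-over-slices computation equals the row decomposition
theorem pv_alt_rows (tone_map : List (Int × List (String × Int))) (c : Int) (hc : 1 ≤ c)
    (m : Nat) (L : List String) (hL : L.length = m * c.toNat) :
    (PySem.List.pyRange 0 (PySem.List.len L) c).map (fun r =>
      (PySem.List.enumerate (PySem.List.slice L (some r) (some (r + c)))).map
        (fun p => pvLookup tone_map p.1 p.2))
      = pvRowsOf tone_map c.toNat m L := by
  have hcast : (PySem.List.len L) = (m : Int) * c := by
    rw [PySem.List.len_eq, hL]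
    push_cast [Int.toNat_of_nonneg (by omega : (0:Int) ≤ c)]
    ring
  rw [hcast, pv_pyRange_rows c hc m (by positivity), List.map_map,
    pv_rowsOf_eq_map tone_map c.toNat m L]
  apply List.map_congr_left
  intro k _
  have h1 : c * (k : Int) = ((c.toNat * k : Nat) : Int) := by
    push_cast [Int.toNat_of_nonneg (by omega : (0:Int) ≤ c)]; ring
  have h2 : c * (k : Int) + c = ((c.toNat * k : Nat) : Int) + ((c.toNat : Nat) : Int) := by
    push_cast [Int.toNat_of_nonneg (by omega : (0:Int) ≤ c)]; ring
  simp only [Function.comp_apply]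
  rw [h2, h1, PySem.List.slice_natCast_add]
  rfl

-- ===== VERDICT (by name: the statement is the Claim_ definition above) =====
theorem bits_to_tones_spec : Claim_equal_bits_to_tones := by
  intro data tone_map chunk_len channels _ hpre
  obtain ⟨hcl0, hch0, hdvd1, hdvd2, hcorner, -⟩ := hpre
  unfold Spec_bits_to_tones bits_to_tones bits_to_tones_alt chunk_data
  set L := (PySem.List.pyRange 0 (PySem.Str.len data) chunk_len).map
    (fun i => PySem.Str.slice data (some i) (some (i + chunk_len))) with hLdef
  have hn : (0 : Int) ≤ PySem.Str.len data := by rw [PySem.Str.len_eq]; positivity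
  by_cases hnilL : L = []
  -- no chunks at all: A's loop body never runs and B has no row start indices
  · rw [hnilL]
    simp [bttLoop, PySem.List.len_eq, pv_pyRange_nil 0 channels le_rfl (Or.inr le_rfl)]
  · have hcl : 1 ≤ chunk_len := by
      by_contra hcon
      exact hnilL (by rw [hLdef, pv_pyRange_nil _ _ hn (Or.inl (by omega))]; rfl)
    have hlen0 : PySem.Str.len data ≠ 0 := by
      intro h0
      exact hnilL (by rw [hLdef, h0, pv_pyRange_nil 0 _ le_rfl (Or.inr le_rfl)]; rfl)
    have hch : 1 ≤ channels := by
      rcases hcorner with h | h | h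
      · exact h
      · exact absurd h hlen0
      · omega
  -- length of the chunk list: (len data / chunk_len), and channels divides it
    obtain ⟨q, hq⟩ : chunk_len ∣ PySem.Str.len data := by
      rw [← PySem.Int.mod_eq_zero_iff_dvd]; exact hdvd1
    have hq0 : 0 ≤ q := by
      have hq' : q = PySem.Str.len data / chunk_len := by
        rw [hq, Int.mul_ediv_cancel_left _ (by omega)]
      rw [hq']; exact Int.ediv_nonneg hn (by omega)
    have hfd : PySem.Int.floordiv (PySem.Str.len data) chunk_len = q := by
      rw [PySem.Int.floordiv_eq_ediv_of_pos (by omega), hq, Int.mul_ediv_cancel_left _ (by omega)]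
    obtain ⟨t, ht⟩ : channels ∣ q := by
      rw [← PySem.Int.mod_eq_zero_iff_dvd, ← hfd]; exact hdvd2
    have ht0 : 0 ≤ t := by
      have ht' : t = q / channels := by rw [ht, Int.mul_ediv_cancel_left _ (by omega)]
      rw [ht']; exact Int.ediv_nonneg hq0 (by omega)
    have hLlen : L.length = t.toNat * channels.toNat := by
      rw [hLdef, List.length_map, PySem.List.pyRange_of_pos _ _ (by omega : (0:Int) < chunk_len),
        List.length_map, List.length_range]
      by_cases hpos : (0 : Int) < PySem.Str.len data
      · rw [if_pos hpos]
        have hcnt : (PySem.Str.len data - 0 + chunk_len - 1) / chunk_len = q := by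
          rw [sub_zero, hq, mul_comm chunk_len q]; exact pv_count_eq q chunk_len hcl hq0
        rw [hcnt, ht]
        have hmul : channels * t = ((t.toNat * channels.toNat : Nat) : Int) := by
          push_cast [Int.toNat_of_nonneg ht0, Int.toNat_of_nonneg (by omega : (0:Int) ≤ channels)]
          ring
        rw [hmul, Int.toNat_natCast]
      · rw [if_neg hpos]
        have hq' : q = 0 := by nlinarith
        have : t = 0 ∨ channels.toNat = 0 := by
          rcases mul_eq_zero.mp (by rw [← ht, hq'] : channels * t = 0) with h | h
          · omega
          · exact Or.inl h
        rcases this with h | h <;> simp [h]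
    rw [pv_bttLoop_rows tone_map channels hch t.toNat L [] (by rw [hLlen])]
    simpa using (pv_alt_rows tone_map channels hch t.toNat L (by rw [hLlen])).symm
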